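-- pv_equiv track=rewrite | github.com/LOCKhart07/random-valory-scripts | polymarket/analyze_persistence.py | find_persistent_bottom
-- ===== SOURCE A (Python) =====
-- from collections import defaultdict
--
-- def find_persistent_bottom(window_quartiles, min_streak=3):
--     """Find agents who stay in bottom quartile for min_streak consecutive windows."""
--     # Track consecutive bottom-quartile runs per agent
--     agent_streaks = defaultdict(int)
--     agent_max_streaks = defaultdict(int)
--
--     for wq in window_quartiles:
--         active = set()
--         for addr, q in wq.items():
--             if q == 0:
--                 agent_streaks[addr] += 1
--                 active.add(addr)
--             else:
--                 agent_streaks[addr] = 0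
--             agent_max_streaks[addr] = max(
--                 agent_max_streaks[addr], agent_streaks[addr]
--             )
--         # Reset agents not present in this window
--         for addr in list(agent_streaks.keys()):
--             if addr not in wq:
--                 agent_streaks[addr] = 0
--
--     return {
--         addr: streak
--         for addr, streak in agent_max_streaks.items()
--         if streak >= min_streak
--     }
-- ===== SOURCE B (Python) =====
-- def find_persistent_bottom(window_quartiles, min_streak=3):
--     """Find agents who stay in bottom quartile for min_streak consecutive windows."""
--     # Stage 1: group by agent -- per agent, the window indices where it sat in the
--     # bottom quartile (q == 0), plus the order in which agents first appear.
--     zero_windows = {}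
--     seen = {}
--     for i, wq in enumerate(window_quartiles):
--         for addr, q in wq.items():
--             if addr not in seen:
--                 seen[addr] = None
--             if q == 0:
--                 zero_windows.setdefault(addr, []).append(i)
--     # Stage 2: an agent's max streak is its longest run of consecutive indices.
--     result = {}
--     for addr in seen:
--         best = 0
--         run = 0
--         prev = None
--         for i in zero_windows.get(addr, []):
--             run = run + 1 if prev == i - 1 else 1
--             if run > best:
--                 best = run
--             prev = i
--         if best >= min_streak:
--             result[addr] = best
--     return result
-- ===== Notes on version B (the rewrite author's own statement) =====
-- stated objective: alternative
-- what changed: B inverts the traversal: instead of A's window-by-window streak counters with a per-window reset pass over every agent ever seen, B groups by agent (one pass collecting each agent's bottom-quartile window indices) and then takes each agent's longest run of consecutive indices.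
import Mathlib
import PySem

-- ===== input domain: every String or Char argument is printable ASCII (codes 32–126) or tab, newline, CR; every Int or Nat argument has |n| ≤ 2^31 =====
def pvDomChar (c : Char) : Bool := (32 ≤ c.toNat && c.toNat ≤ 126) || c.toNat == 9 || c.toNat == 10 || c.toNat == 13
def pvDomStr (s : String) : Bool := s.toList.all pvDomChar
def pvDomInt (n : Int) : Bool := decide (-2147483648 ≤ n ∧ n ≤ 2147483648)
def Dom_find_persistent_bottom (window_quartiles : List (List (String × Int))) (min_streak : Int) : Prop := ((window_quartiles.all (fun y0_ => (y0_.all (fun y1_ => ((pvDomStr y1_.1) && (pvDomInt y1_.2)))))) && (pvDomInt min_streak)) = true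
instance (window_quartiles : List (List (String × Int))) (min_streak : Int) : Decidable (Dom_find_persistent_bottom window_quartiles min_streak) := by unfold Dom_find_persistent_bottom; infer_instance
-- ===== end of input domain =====

-- B replaces A's window-by-window streak counters (with a reset pass over every agent
-- ever seen in each window) by a group-by-agent two-stage pass: collect each agent's
-- bottom-quartile window indices, then take its longest run of consecutive indices
-- (objective: alternative decomposition; avoids A's per-window reset scan).

-- ===== PORT A =====
-- one item of the inner `for addr, q in wq.items()` loop (defaultdict reads → getD _ 0)
def pvStepA (st : PySem.Dict String Int × PySem.Dict String Int) (p : String × Int) :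
    PySem.Dict String Int × PySem.Dict String Int :=
  let streaks := if p.2 == 0 then st.1.insert p.1 (st.1.getD p.1 0 + 1) else st.1.insert p.1 0
  let maxs := st.2.insert p.1 (max (st.2.getD p.1 0) (streaks.getD p.1 0))
  (streaks, maxs)

-- one whole-window step of A's outer loop (inner items loop, then the reset pass)
def pvWinA (st : PySem.Dict String Int × PySem.Dict String Int) (wq : List (String × Int)) :
    PySem.Dict String Int × PySem.Dict String Int :=
  let d := PySem.Dict.ofList wq
  let st' := d.items.foldl pvStepA st
  -- `for addr in list(agent_streaks.keys()): if addr not in wq: agent_streaks[addr] = 0`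
  (st'.1.keys.foldl (fun s a => if d.contains a then s else s.insert a 0) st'.1, st'.2)

def find_persistent_bottom (window_quartiles : List (List (String × Int))) (min_streak : Int) : List (String × Int) :=
  (window_quartiles.foldl pvWinA (PySem.Dict.empty, PySem.Dict.empty)).2.items.filter
    (fun p => decide (min_streak ≤ p.2))

-- ===== PORT B =====
-- one item of B's stage-1 loop at window index i; state = (zero_windows, seen);
-- `zero_windows.setdefault(addr, []).append(i)` = rebind addr to its list with i appended
def pvGatherItem (i : Int)
    (st : PySem.Dict String (List Int) × PySem.Dict String (Option Int))
    (p : String × Int) : PySem.Dict String (List Int) × PySem.Dict String (Option Int) :=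
  let seen := if st.2.contains p.1 then st.2 else st.2.insert p.1 none
  let zw := if p.2 == 0 then st.1.insert p.1 (st.1.getD p.1 [] ++ [i]) else st.1
  (zw, seen)

-- one window of B's stage-1 `for i, wq in enumerate(...)` loop
def pvGatherWin (st : PySem.Dict String (List Int) × PySem.Dict String (Option Int))
    (iw : Int × List (String × Int)) :
    PySem.Dict String (List Int) × PySem.Dict String (Option Int) :=
  (PySem.Dict.ofList iw.2).items.foldl (pvGatherItem iw.1) st

-- one step of B's stage-2 inner loop; state = (best, run, prev)
def pvRunStep (st : Int × Int × Option Int) (i : Int) : Int × Int × Option Int :=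
  let run := if st.2.2 == some (i - 1) then st.2.1 + 1 else (1 : Int)
  let best := if run > st.1 then run else st.1
  (best, run, some i)

-- stage-2 body for one agent: longest run of consecutive indices
def pvBest (zs : List Int) : Int := (zs.foldl pvRunStep (0, 0, none)).1

def find_persistent_bottom_alt (window_quartiles : List (List (String × Int))) (min_streak : Int) : List (String × Int) :=
  let g := (PySem.List.enumerate window_quartiles 0).foldl pvGatherWin
    (PySem.Dict.empty, PySem.Dict.empty)
  (g.2.keys.foldl (fun r a =>
      let best := pvBest (g.1.getD a [])
      if min_streak ≤ best then r.insert a best else r) PySem.Dict.empty).items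

-- ===== PRECONDITION & SPEC =====
def Spec_find_persistent_bottom (window_quartiles : List (List (String × Int))) (min_streak : Int) (out : List (String × Int)) : Prop := out = find_persistent_bottom_alt window_quartiles min_streak
instance (window_quartiles : List (List (String × Int))) (min_streak : Int) (out : List (String × Int)) : Decidable (Spec_find_persistent_bottom window_quartiles min_streak out) := by unfold Spec_find_persistent_bottom; infer_instance

-- ===== CLAIM (what is proved, stated in full; the proofs are below) =====
def Claim_equal_find_persistent_bottom : Prop := ∀ (window_quartiles : List (List (String × Int))) (min_streak : Int), Dom_find_persistent_bottom window_quartiles min_streak → Spec_find_persistent_bottom window_quartiles min_streak (find_persistent_bottom window_quartiles min_streak)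

-- ===== LEMMAS AND PROOFS =====

-- A's current streak entering window n, read off an agent's zero-index list
def pvS (n : Int) (zs : List Int) : Int :=
  if (zs.foldl pvRunStep (0, 0, none)).2.2 = some (n - 1)
  then (zs.foldl pvRunStep (0, 0, none)).2.1 else 0

theorem pv_best_mono (zs : List Int) (s : Int × Int × Option Int) :
    s.1 ≤ (zs.foldl pvRunStep s).1 := by
  induction zs generalizing s with
  | nil => exact le_refl _
  | cons i zs ih =>
    refine le_trans ?_ (ih (pvRunStep s i))
    simp only [pvRunStep]
    split_ifs <;> omega

theorem pv_prev_mem (zs : List Int) (s : Int × Int × Option Int) (j : Int)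
    (h : (zs.foldl pvRunStep s).2.2 = some j) : s.2.2 = some j ∨ j ∈ zs := by
  induction zs generalizing s with
  | nil => exact Or.inl h
  | cons i zs ih =>
    rcases ih (pvRunStep s i) h with h' | h'
    · simp only [pvRunStep] at h'
      exact Or.inr (by simp at h'; simp [h'])
    · exact Or.inr (List.mem_cons_of_mem _ h')

-- A's reset pass, characterised by lookups
theorem pv_reset_getD (ks : List String) (c : String → Bool) (s0 : PySem.Dict String Int) (x : String) :
    (ks.foldl (fun s a => if c a then s else s.insert a 0) s0).getD x 0 =
      if x ∈ ks ∧ c x = false then 0 else s0.getD x 0 := by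
  induction ks generalizing s0 with
  | nil => simp
  | cons a ks ih =>
    simp only [List.foldl_cons, ih]
    by_cases hca : c a
    · simp [hca]
      by_cases hx : x ∈ ks ∧ c x = false
      · simp [hx.1, hx.2]
      · rcases (not_and_or.mp hx) with h | h
        · by_cases hxa : x = a
          · subst hxa; simp [hca]
          · simp [h, hxa]
        · simp at h; simp [h]
    · simp only [hca]
      by_cases hx : x ∈ ks ∧ c x = false
      · simp [hx.1, hx.2]
      · rcases (not_and_or.mp hx) with h | h
        · by_cases hxa : x = a
          · subst hxa
            simp at hca
            simp [hca]
          · simp [h, hxa, PySem.Dict.getD_insert]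
        · simp at h
          by_cases hxa : x = a
          · subst hxa; simp [h] at hca
          · simp [h, hxa, PySem.Dict.getD_insert]

-- keys of A's streak dict only grow through the inner loop
theorem pv_stepA_contains (l : List (String × Int)) (streaks maxs : PySem.Dict String Int)
    (a : String) (h : streaks.contains a = true) :
    (l.foldl pvStepA (streaks, maxs)).1.contains a = true := by
  induction l generalizing streaks maxs with
  | nil => exact h
  | cons p l ih =>
    simp only [List.foldl_cons]
    by_cases hq : p.2 == 0
    · exact ih _ _ (by simp [hq, PySem.Dict.contains_insert, h])
    · exact ih _ _ (by simp [hq, PySem.Dict.contains_insert, h])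

-- one window's inner item loop, A vs B's gathering loop
theorem pv_window (n : Int) (l : List (String × Int))
    (streaks maxs : PySem.Dict String Int)
    (zw : PySem.Dict String (List Int)) (seen : PySem.Dict String (Option Int))
    (hnd : (l.map Prod.fst).Nodup)
    (hkeys : maxs.keys = seen.keys)
    (hS : ∀ p ∈ l, streaks.getD p.1 0 = pvS n (zw.getD p.1 []))
    (hM : ∀ p ∈ l, maxs.getD p.1 0 = pvBest (zw.getD p.1 []))
    (hB0 : ∀ p ∈ l, ∀ j ∈ zw.getD p.1 [], j < n) :
    (l.foldl pvStepA (streaks, maxs)).2.keys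
        = (l.foldl (pvGatherItem n) (zw, seen)).2.keys ∧
    (∀ a ∈ l.map Prod.fst,
        (l.foldl pvStepA (streaks, maxs)).2.getD a 0
          = pvBest ((l.foldl (pvGatherItem n) (zw, seen)).1.getD a []) ∧
        (l.foldl pvStepA (streaks, maxs)).1.getD a 0
          = pvS (n + 1) ((l.foldl (pvGatherItem n) (zw, seen)).1.getD a [])) ∧
    (∀ a, a ∉ l.map Prod.fst →
        (l.foldl pvStepA (streaks, maxs)).1.getD a 0 = streaks.getD a 0 ∧
        (l.foldl pvStepA (streaks, maxs)).2.getD a 0 = maxs.getD a 0 ∧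
        (l.foldl (pvGatherItem n) (zw, seen)).1.getD a [] = zw.getD a []) ∧
    (∀ a, (l.foldl (pvGatherItem n) (zw, seen)).1.getD a [] = zw.getD a []
        ∨ (l.foldl (pvGatherItem n) (zw, seen)).1.getD a [] = zw.getD a [] ++ [n]) := by
  induction l generalizing streaks maxs zw seen with
  | nil => exact ⟨hkeys, by simp, by simp, fun a => Or.inl rfl⟩
  | cons p l ih =>
    simp only [List.map_cons, List.nodup_cons] at hnd
    obtain ⟨hpnot, hnd'⟩ := hnd
    have hSp := hS p (by simp)
    have hMp := hM p (by simp)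
    have hB0p := hB0 p (by simp)
    -- keys step for maxs/seen is identical
    have hcontains : maxs.contains p.1 = seen.contains p.1 := by
      rw [PySem.Dict.contains_eq_decide_mem_keys, PySem.Dict.contains_eq_decide_mem_keys, hkeys]
    simp only [List.foldl_cons]
    by_cases hq : p.2 == 0
    · -- q == 0 branch
      set zs := zw.getD p.1 [] with hzs
      have hA : pvStepA (streaks, maxs) p =
          (streaks.insert p.1 (streaks.getD p.1 0 + 1),
           maxs.insert p.1 (max (maxs.getD p.1 0) (streaks.getD p.1 0 + 1))) := by
        simp [pvStepA, hq, PySem.Dict.getD_insert_self]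
      have hB : pvGatherItem n (zw, seen) p =
          (zw.insert p.1 (zs ++ [n]),
           if seen.contains p.1 then seen else seen.insert p.1 none) := by
        simp [pvGatherItem, hq]
        rw [hzs]
      rw [hA, hB]
      have hkeys' : (maxs.insert p.1 (max (maxs.getD p.1 0) (streaks.getD p.1 0 + 1))).keys
          = (if seen.contains p.1 then seen else seen.insert p.1 none).keys := by
        by_cases hc : seen.contains p.1
        · rw [if_pos hc, PySem.Dict.keys_insert_of_contains _ _ (by rw [hcontains]; exact hc), hkeys]
        · rw [if_neg hc,
            PySem.Dict.keys_insert_of_not_contains _ _ (by rw [hcontains]; simpa using hc),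
            PySem.Dict.keys_insert_of_not_contains _ _ (by simpa using hc), hkeys]
      have ihx := ih (streaks.insert p.1 (streaks.getD p.1 0 + 1))
        (maxs.insert p.1 (max (maxs.getD p.1 0) (streaks.getD p.1 0 + 1)))
        (zw.insert p.1 (zs ++ [n]))
        (if seen.contains p.1 then seen else seen.insert p.1 none) hnd' hkeys'
        (fun r hr => by
          have hne : r.1 ≠ p.1 := fun h => hpnot (h ▸ List.mem_map_of_mem hr)
          rw [PySem.Dict.getD_insert, if_neg hne, PySem.Dict.getD_insert, if_neg hne]
          exact hS r (by simp [hr]))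
        (fun r hr => by
          have hne : r.1 ≠ p.1 := fun h => hpnot (h ▸ List.mem_map_of_mem hr)
          rw [PySem.Dict.getD_insert, if_neg hne, PySem.Dict.getD_insert, if_neg hne]
          exact hM r (by simp [hr]))
        (fun r hr => by
          have hne : r.1 ≠ p.1 := fun h => hpnot (h ▸ List.mem_map_of_mem hr)
          rw [PySem.Dict.getD_insert, if_neg hne]
          exact hB0 r (by simp [hr]))
      refine ⟨ihx.1, ?_, ?_, ?_⟩
      · intro a ha
        simp only [List.map_cons, List.mem_cons] at ha
        rcases ha with ha | ha
        · obtain ⟨h1, h2, h3⟩ := ihx.2.2.1 a (by rw [ha]; simpa using hpnot)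
          rw [ha] at h1 h2 h3 ⊢
          rw [h1, h2, h3, PySem.Dict.getD_insert_self, PySem.Dict.getD_insert_self,
            PySem.Dict.getD_insert_self]
          -- scan (zs ++ [n]) = one pvRunStep past scan zs
          have hsc : (zs ++ [n]).foldl pvRunStep (0, 0, none)
              = pvRunStep (zs.foldl pvRunStep (0, 0, none)) n := by
            rw [List.foldl_append]; rfl
          have hrun : (if (zs.foldl pvRunStep (0, 0, none)).2.2 == some (n - 1)
                then (zs.foldl pvRunStep (0, 0, none)).2.1 + 1 else (1 : Int))
              = pvS n zs + 1 := by
            unfold pvS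
            by_cases hprev : (zs.foldl pvRunStep (0, 0, none)).2.2 = some (n - 1)
            · simp [hprev]
            · simp [hprev]
          constructor
          · unfold pvBest
            rw [hsc, hSp, hMp]
            unfold pvBest
            simp only [pvRunStep, hrun]
            split_ifs <;> omega
          · unfold pvS
            rw [hsc, hSp]
            simp only [pvRunStep, hrun]
            have : n + 1 - 1 = n := by omega
            simp [this]
        · exact ihx.2.1 a ha
      · intro a ha
        simp only [List.map_cons, List.mem_cons, not_or] at ha
        obtain ⟨h1, h2, h3⟩ := ihx.2.2.1 a ha.2
        have hne : a ≠ p.1 := ha.1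
        rw [h1, h2, h3, PySem.Dict.getD_insert, if_neg hne, PySem.Dict.getD_insert, if_neg hne,
          PySem.Dict.getD_insert, if_neg hne]
        exact ⟨rfl, rfl, rfl⟩
      · intro a
        by_cases hmem : a ∈ l.map Prod.fst
        · rcases ihx.2.2.2 a with h | h
          · rw [h, PySem.Dict.getD_insert]
            by_cases hne : a = p.1
            · subst hne; exact absurd hmem hpnot
            · simp [hne]
          · rw [h, PySem.Dict.getD_insert]
            by_cases hne : a = p.1
            · subst hne; exact absurd hmem hpnot
            · simp [hne]
        · obtain ⟨_, _, h3⟩ := ihx.2.2.1 a hmem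
          rw [h3, PySem.Dict.getD_insert]
          by_cases hne : a = p.1
          · subst hne; simp; exact Or.inr hzs
          · simp [hne]
    · -- q != 0 branch
      set zs := zw.getD p.1 [] with hzs
      have hA : pvStepA (streaks, maxs) p =
          (streaks.insert p.1 0, maxs.insert p.1 (max (maxs.getD p.1 0) 0)) := by
        simp [pvStepA, hq, PySem.Dict.getD_insert_self]
      have hB : pvGatherItem n (zw, seen) p =
          (zw, if seen.contains p.1 then seen else seen.insert p.1 none) := by
        simp [pvGatherItem, hq]
      rw [hA, hB]
      have hkeys' : (maxs.insert p.1 (max (maxs.getD p.1 0) 0)).keys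
          = (if seen.contains p.1 then seen else seen.insert p.1 none).keys := by
        by_cases hc : seen.contains p.1
        · rw [if_pos hc, PySem.Dict.keys_insert_of_contains _ _ (by rw [hcontains]; exact hc), hkeys]
        · rw [if_neg hc,
            PySem.Dict.keys_insert_of_not_contains _ _ (by rw [hcontains]; simpa using hc),
            PySem.Dict.keys_insert_of_not_contains _ _ (by simpa using hc), hkeys]
      have ihx := ih (streaks.insert p.1 0) (maxs.insert p.1 (max (maxs.getD p.1 0) 0))
        zw (if seen.contains p.1 then seen else seen.insert p.1 none) hnd' hkeys'
        (fun r hr => by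
          have hne : r.1 ≠ p.1 := fun h => hpnot (h ▸ List.mem_map_of_mem hr)
          rw [PySem.Dict.getD_insert, if_neg hne]
          exact hS r (by simp [hr]))
        (fun r hr => by
          have hne : r.1 ≠ p.1 := fun h => hpnot (h ▸ List.mem_map_of_mem hr)
          rw [PySem.Dict.getD_insert, if_neg hne]
          exact hM r (by simp [hr]))
        (fun r hr => hB0 r (by simp [hr]))
      refine ⟨ihx.1, ?_, ?_, ihx.2.2.2⟩
      · intro a ha
        simp only [List.map_cons, List.mem_cons] at ha
        rcases ha with ha | ha
        · obtain ⟨h1, h2, h3⟩ := ihx.2.2.1 a (by rw [ha]; simpa using hpnot)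
          rw [ha] at h1 h2 h3 ⊢
          rw [h1, h2, h3, PySem.Dict.getD_insert_self, PySem.Dict.getD_insert_self]
          have hbnn : (0 : Int) ≤ pvBest zs := pv_best_mono zs (0, 0, none)
          constructor
          · rw [hMp, max_eq_left hbnn, hzs]
          · unfold pvS
            have hn : n + 1 - 1 = n := by omega
            rw [hn, ← hzs]
            by_cases hprev : (zs.foldl pvRunStep (0, 0, none)).2.2 = some n
            · exfalso
              rcases pv_prev_mem zs (0, 0, none) _ hprev with h | h
              · simp at h
              · exact absurd (hB0p n h) (by omega)
            · simp [hprev]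
        · exact ihx.2.1 a ha
      · intro a ha
        simp only [List.map_cons, List.mem_cons, not_or] at ha
        obtain ⟨h1, h2, h3⟩ := ihx.2.2.1 a ha.2
        have hne : a ≠ p.1 := ha.1
        rw [h1, h2, h3, PySem.Dict.getD_insert, if_neg hne, PySem.Dict.getD_insert, if_neg hne]
        exact ⟨rfl, rfl, rfl⟩

-- the outer loop: A's window fold against B's enumerated gathering fold
theorem pv_outer (ws : List (List (String × Int))) (n : Int)
    (streaks maxs : PySem.Dict String Int)
    (zw : PySem.Dict String (List Int)) (seen : PySem.Dict String (Option Int))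
    (hkeys : maxs.keys = seen.keys)
    (hS : ∀ a, streaks.getD a 0 = pvS n (zw.getD a []))
    (hM : ∀ a, maxs.getD a 0 = pvBest (zw.getD a []))
    (hB0 : ∀ a j, j ∈ zw.getD a [] → j < n) :
    (ws.foldl pvWinA (streaks, maxs)).2.keys
        = ((PySem.List.enumerate ws n).foldl pvGatherWin (zw, seen)).2.keys ∧
    ∀ a, (ws.foldl pvWinA (streaks, maxs)).2.getD a 0
        = pvBest (((PySem.List.enumerate ws n).foldl pvGatherWin (zw, seen)).1.getD a []) := by
  induction ws generalizing n streaks maxs zw seen with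
  | nil => exact ⟨hkeys, hM⟩
  | cons wq ws ih =>
    rw [PySem.List.enumerate_cons]
    simp only [List.foldl_cons]
    set d := PySem.Dict.ofList wq with hd
    have hnd : (d.items.map Prod.fst).Nodup := by
      have h := PySem.Dict.nodup_keys_ofList wq
      simpa [PySem.Dict.keys] using h
    have hw := pv_window n d.items streaks maxs zw seen hnd hkeys
      (fun p _ => hS p.1) (fun p _ => hM p.1) (fun p _ => hB0 p.1)
    set A' := d.items.foldl pvStepA (streaks, maxs) with hA'
    set B' := d.items.foldl (pvGatherItem n) (zw, seen) with hB'
    have hstep : pvWinA (streaks, maxs) wq =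
        (A'.1.keys.foldl (fun s a => if d.contains a then s else s.insert a 0) A'.1, A'.2) := rfl
    have hstepB : pvGatherWin (zw, seen) (n, wq) = B' := rfl
    rw [hstep, hstepB]
    apply ih (n + 1) _ _ _ _ hw.1
    · -- streak invariant entering window n+1
      intro a
      rw [pv_reset_getD]
      by_cases hmem : a ∈ d.items.map Prod.fst
      · have hc : d.contains a = true := by
          rw [PySem.Dict.contains_eq_decide_mem_keys]
          simpa [PySem.Dict.keys] using hmem
        rw [if_neg (by simp [hc])]
        exact (hw.2.1 a hmem).2
      · have hc : d.contains a = false := by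
          rw [PySem.Dict.contains_eq_decide_mem_keys]
          simpa [PySem.Dict.keys] using hmem
        obtain ⟨h1, _, h3⟩ := hw.2.2.1 a hmem
        have hrhs : pvS (n + 1) (B'.1.getD a []) = 0 := by
          rw [h3]
          unfold pvS
          have hn : n + 1 - 1 = n := by omega
          rw [hn]
          by_cases hprev : ((zw.getD a []).foldl pvRunStep (0, 0, none)).2.2 = some n
          · exfalso
            rcases pv_prev_mem _ (0, 0, none) _ hprev with h | h
            · simp at h
            · exact absurd (hB0 a n h) (by omega)
          · simp [hprev]
        rw [hrhs]
        by_cases hk : a ∈ A'.1.keys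
        · rw [if_pos ⟨hk, hc⟩]
        · rw [if_neg (by simp [hk]), h1]
          have hsc : streaks.contains a = false := by
            rw [Bool.eq_false_iff]
            intro h
            exact hk ((PySem.Dict.contains_iff_mem_keys _ _).mp
              (pv_stepA_contains d.items streaks maxs a h))
          exact PySem.Dict.getD_of_not_contains _ _ hsc
    · -- max invariant entering window n+1
      intro a
      by_cases hmem : a ∈ d.items.map Prod.fst
      · exact (hw.2.1 a hmem).1
      · obtain ⟨_, h2, h3⟩ := hw.2.2.1 a hmem
        rw [h2, h3]
        exact hM a
    · -- zero-index lists stay below the next window index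
      intro a j hj
      rcases hw.2.2.2 a with h | h
      · rw [h] at hj
        exact lt_trans (hB0 a j hj) (by omega)
      · rw [h] at hj
        rcases List.mem_append.mp hj with h' | h'
        · exact lt_trans (hB0 a j h') (by omega)
        · simp at h'
          omega

-- `seen`'s keys stay nodup through B's gathering loops
theorem pv_gather_item_nodup (n : Int) (l : List (String × Int))
    (st : PySem.Dict String (List Int) × PySem.Dict String (Option Int))
    (h : st.2.keys.Nodup) : (l.foldl (pvGatherItem n) st).2.keys.Nodup := by
  induction l generalizing st with
  | nil => exact h
  | cons p l ih =>
    refine ih _ ?_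
    simp only [pvGatherItem]
    by_cases hc : st.2.contains p.1
    · simpa [hc] using h
    · simp only [hc]
      simpa using PySem.Dict.nodup_keys_insert _ _ _ h

theorem pv_gather_nodup (ews : List (Int × List (String × Int)))
    (st : PySem.Dict String (List Int) × PySem.Dict String (Option Int))
    (h : st.2.keys.Nodup) : (ews.foldl pvGatherWin st).2.keys.Nodup := by
  induction ews generalizing st with
  | nil => exact h
  | cons iw ews ih => exact ih _ (pv_gather_item_nodup iw.1 _ st h)

-- B's stage-2 result loop over fresh nodup keys builds a filtered map
theorem pv_result (ks : List String) (f : String → Int) (m : Int) (r : PySem.Dict String Int)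
    (hnd : ks.Nodup) (hfresh : ∀ a ∈ ks, r.contains a = false) :
    (ks.foldl (fun r a => if m ≤ f a then r.insert a (f a) else r) r).items
      = r.items ++ (ks.filter (fun a => decide (m ≤ f a))).map (fun a => (a, f a)) := by
  induction ks generalizing r with
  | nil => simp
  | cons a ks ih =>
    simp only [List.nodup_cons] at hnd
    simp only [List.foldl_cons, List.filter_cons]
    by_cases hma : m ≤ f a
    · rw [if_pos hma,
        ih (r.insert a (f a)) hnd.2 (fun b hb => by
          rw [PySem.Dict.contains_insert]
          have hba : b ≠ a := fun h => hnd.1 (h ▸ hb)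
          simp [hba, hfresh b (List.mem_cons_of_mem _ hb)]),
        PySem.Dict.items_insert_of_not_contains _ _ (hfresh a (by simp))]
      simp [hma]
    · rw [if_neg hma, ih r hnd.2 (fun b hb => hfresh b (List.mem_cons_of_mem _ hb))]
      simp [hma]

-- ===== VERDICT (by name: the statement is the Claim_ definition above) =====
theorem find_persistent_bottom_spec : Claim_equal_find_persistent_bottom := by
  intro ws m _
  unfold Spec_find_persistent_bottom
  simp only [find_persistent_bottom, find_persistent_bottom_alt]
  have h := pv_outer ws 0 PySem.Dict.empty PySem.Dict.empty PySem.Dict.empty PySem.Dict.empty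
    rfl
    (fun a => by simp [pvS, PySem.Dict.getD_empty])
    (fun a => by simp [pvBest, PySem.Dict.getD_empty])
    (fun a j hj => by simp [PySem.Dict.getD_empty] at hj)
  set M := (ws.foldl pvWinA (PySem.Dict.empty, PySem.Dict.empty)).2 with hM
  set g := (PySem.List.enumerate ws 0).foldl pvGatherWin (PySem.Dict.empty, PySem.Dict.empty)
    with hg
  have hsnd : g.2.keys.Nodup := pv_gather_nodup _ _ (by simp)
  have hMnd : M.keys.Nodup := h.1 ▸ hsnd
  rw [pv_result g.2.keys (fun a => pvBest (g.1.getD a [])) m PySem.Dict.empty hsnd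
    (fun a _ => PySem.Dict.contains_empty a)]
  rw [PySem.Dict.items_eq_map_keys M hMnd 0, List.filter_map]
  simp only [Function.comp_def, h.2, h.1]
  simp [PySem.Dict.empty]
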